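-- pv_equiv track=rewrite | github.com/aj-git02/COL100-assignments | assg5 submitted.py | stringProblem
-- ===== SOURCE A (Python) =====
-- def vowel(n):
--     if n in ['a','e','i','o','u']:
--         return True
--     return False
--
-- def stringProblem(a,b):
--     #assert: a,b are non-empty strings
--     A=[[0 for i in range(len(b)+1)] for j in range(len(a)+1)]
--     # character b[j-1] represents jth index coloumn (coloumn starting from 0)
--     # character a[i-1] represents ith index row (row starting from 0)
--     for i in range(len(b)+1): # reason for doing this loop is written at last of this function **
--         A[0][i]=i
--     for j in range(len(a)+1):
--         A[j][0]=j
--     for i in range(1,len(a)+1):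
--         #invariant: A[x][y] represents the min. number of changes to convert string a[0:x] to b[0:y] for x<i
--         for j in range(1,len(b)+1):
--             #invariant: A[x][y] represents the min. number of changes to convert string a[0:x] to b[0:y] for x<i+1,y<j
--             if a[i-1]==b[j-1]:
--                 # since the two characters are already equal min no. changes will be the changes required to change the remaining list
--                 A[i][j]=A[i-1][j-1]
--             else:
--                 if vowel(a[i-1]):
--                     if vowel(b[j-1]):
--                         # min of three possibilities either replace a[i-1] by b[j-1] or delete a[i-1] or insert b[j-1]
--                         A[i][j]=1+min(A[i-1][j],A[i][j-1],A[i-1][j-1])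
--                         # A[i-1][j] represent deletion of element from string a
--                         # A[i][j-1] represents insertion of an element in string a and then since the elements will be equal min changes in the remaining part of the string have to be found out
--                         # A[i-1][j-1] represents replacement of a[i-1] by b[j-1]
--                     else:
--                         # min of two possibilities either delete a[i-1] or insert b[j-1]
--                         # replacement is not possible in this case
--                         A[i][j]=1+min(A[i-1][j],A[i][j-1])
--                 else:
--                     # min of three possibilities either replace a[i-1] by b[j-1] or delete a[i-1] or insert b[j-1]
--                     A[i][j]=1+min(A[i-1][j],A[i][j-1],A[i-1][j-1])
--             #assert: A[x][y] represents the min. number of changes to convert string a[0:x] to b[0:y] for x<i,y<j+1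
--         #assert: A[x][y] represents the min. number of changes to convert string a[0:x] to b[0:y] for x<i+1
--     return A[len(a)][len(b)]
-- ===== SOURCE B (Python) =====
-- def stringProblem(a, b):
--     # Top-down memoized recursion: ed(i, j) = min edits turning a[:i] into b[:j];
--     # only states actually reachable from (len(a), len(b)) are computed.
--     vowels = ('a', 'e', 'i', 'o', 'u')
--     cache = {}
--     def ed(i, j):
--         hit = cache.get((i, j))
--         if hit is not None:
--             return hit
--         if i == 0:
--             r = j
--         elif j == 0:
--             r = i
--         elif a[i - 1] == b[j - 1]:
--             r = ed(i - 1, j - 1)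
--         elif a[i - 1] in vowels and b[j - 1] not in vowels:
--             r = 1 + min(ed(i - 1, j), ed(i, j - 1))
--         else:
--             r = 1 + min(ed(i - 1, j), ed(i, j - 1), ed(i - 1, j - 1))
--         cache[(i, j)] = r
--         return r
--     return ed(len(a), len(b))
-- ===== Notes on version B (the rewrite author's own statement) =====
-- stated objective: alternative
-- what changed: A eagerly allocates and fills the whole (len(a)+1)x(len(b)+1) table bottom-up with three initialisation/fill loops; B replaces the table and loops entirely by a demand-driven top-down recursion ed(i,j) memoized in a dict, computing only the states reachable from (len(a),len(b)).
import Mathlib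
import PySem

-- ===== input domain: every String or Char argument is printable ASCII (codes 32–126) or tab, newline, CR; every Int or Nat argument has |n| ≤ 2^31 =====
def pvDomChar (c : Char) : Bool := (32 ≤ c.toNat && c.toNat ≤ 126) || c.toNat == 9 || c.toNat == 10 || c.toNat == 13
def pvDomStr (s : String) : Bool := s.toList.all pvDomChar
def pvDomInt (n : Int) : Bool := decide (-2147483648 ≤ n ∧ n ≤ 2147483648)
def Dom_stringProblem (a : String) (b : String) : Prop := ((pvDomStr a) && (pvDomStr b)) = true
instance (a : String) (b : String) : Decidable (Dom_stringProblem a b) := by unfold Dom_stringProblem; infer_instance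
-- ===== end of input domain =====

-- B replaces A's eagerly filled full DP table by demand-driven top-down memoized
-- recursion (a dict cache keyed by (i,j)); same return value on every input.

-- ===== PORT A =====
-- vowel(n): n in ['a','e','i','o','u']
def pvVowel (c : Char) : Bool := ['a','e','i','o','u'].contains c

-- read A[x][y] (every read A performs is in range, so the defaults are never returned)
def pvGetCell (T : List (List Int)) (x y : Nat) : Int := (T.getD x []).getD y 0
-- A[x][y] = v
def pvSetCell (T : List (List Int)) (x y : Nat) (v : Int) : List (List Int) :=
  T.set x ((T.getD x []).set y v)

-- body of A's inner loop; i' = i-1, j' = j-1 (Python's i, j run from 1)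
def pvRowStep (la lb : List Char) (i' : Nat) (T : List (List Int)) (j' : Nat) : List (List Int) :=
  let i := i' + 1
  let j := j' + 1
  if la.getD (i-1) ' ' == lb.getD (j-1) ' ' then
    pvSetCell T i j (pvGetCell T (i-1) (j-1))
  else
    if pvVowel (la.getD (i-1) ' ') then
      if pvVowel (lb.getD (j-1) ' ') then
        pvSetCell T i j (1 + min (min (pvGetCell T (i-1) j) (pvGetCell T i (j-1))) (pvGetCell T (i-1) (j-1)))
      else
        pvSetCell T i j (1 + min (pvGetCell T (i-1) j) (pvGetCell T i (j-1)))
    else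
      pvSetCell T i j (1 + min (min (pvGetCell T (i-1) j) (pvGetCell T i (j-1))) (pvGetCell T (i-1) (j-1)))

-- A's outer loop body: fill row i = i'+1
def pvOuterStep (la lb : List Char) (T : List (List Int)) (i' : Nat) : List (List Int) :=
  (List.range lb.length).foldl (pvRowStep la lb i') T

def stringProblem (a : String) (b : String) : Int :=
  let la := a.toList
  let lb := b.toList
  let n := la.length
  let m := lb.length
  -- A = [[0 for i in range(len(b)+1)] for j in range(len(a)+1)]
  let T0 : List (List Int) := (List.range (n+1)).map (fun _ => (List.range (m+1)).map (fun _ => (0:Int)))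
  -- for i in range(len(b)+1): A[0][i] = i
  let T1 := (List.range (m+1)).foldl (fun T i => pvSetCell T 0 i (i:Int)) T0
  -- for j in range(len(a)+1): A[j][0] = j
  let T2 := (List.range (n+1)).foldl (fun T j => pvSetCell T j 0 (j:Int)) T1
  -- the nested DP loops
  let T3 := (List.range n).foldl (pvOuterStep la lb) T2
  pvGetCell T3 n m

-- ===== PORT B =====
-- vowels = ('a','e','i','o','u'); membership test
def pvVowelB (c : Char) : Bool := ['a','e','i','o','u'].contains c

-- ed(i, j) with the cache threaded through (Python mutates the enclosing dict);
-- returns (value, cache after the call).  Recursive calls in Python's left-to-right order.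
def pvEdMemo (la lb : List Char) (i j : Nat) (c : PySem.Dict (Nat × Nat) Int) :
    Int × PySem.Dict (Nat × Nat) Int :=
  match c.get? (i, j) with
  | some v => (v, c)                                    -- hit = cache.get((i,j)); if hit is not None: return hit
  | none =>
    let p : Int × PySem.Dict (Nat × Nat) Int :=
      if hi : i = 0 then ((j : Int), c)                 -- if i == 0: r = j
      else if hj : j = 0 then ((i : Int), c)            -- elif j == 0: r = i
      else if la.getD (i-1) ' ' == lb.getD (j-1) ' ' then
        pvEdMemo la lb (i-1) (j-1) c                    -- r = ed(i-1, j-1)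
      else if pvVowelB (la.getD (i-1) ' ') && !pvVowelB (lb.getD (j-1) ' ') then
        let q1 := pvEdMemo la lb (i-1) j c
        let q2 := pvEdMemo la lb i (j-1) q1.2
        (1 + min q1.1 q2.1, q2.2)                       -- r = 1 + min(ed(i-1,j), ed(i,j-1))
      else
        let q1 := pvEdMemo la lb (i-1) j c
        let q2 := pvEdMemo la lb i (j-1) q1.2
        let q3 := pvEdMemo la lb (i-1) (j-1) q2.2
        (1 + min (min q1.1 q2.1) q3.1, q3.2)            -- r = 1 + min(ed(i-1,j), ed(i,j-1), ed(i-1,j-1))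
    (p.1, p.2.insert (i, j) p.1)                        -- cache[(i,j)] = r; return r
termination_by i + j
decreasing_by all_goals omega

def stringProblem_alt (a : String) (b : String) : Int :=
  (pvEdMemo a.toList b.toList a.toList.length b.toList.length PySem.Dict.empty).1

-- ===== PRECONDITION & SPEC =====
def Spec_stringProblem (a : String) (b : String) (out : Int) : Prop := out = stringProblem_alt a b
instance (a : String) (b : String) (out : Int) : Decidable (Spec_stringProblem a b out) := by unfold Spec_stringProblem; infer_instance

-- ===== CLAIM (what is proved, stated in full; the proofs are below) =====
def Claim_equal_stringProblem : Prop := ∀ (a : String) (b : String), Dom_stringProblem a b → Spec_stringProblem a b (stringProblem a b)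

-- ===== LEMMAS AND PROOFS =====

-- the recurrence both programs compute: pvEd la lb i j = min edits turning la[:i] into lb[:j]
def pvEd (la lb : List Char) : Nat → Nat → Int
  | 0, j => (j : Int)
  | i+1, 0 => ((i : Int) + 1)
  | i+1, j+1 =>
    if la.getD i ' ' == lb.getD j ' ' then pvEd la lb i j
    else if pvVowel (la.getD i ' ') && !(pvVowel (lb.getD j ' ')) then
      1 + min (pvEd la lb i (j+1)) (pvEd la lb (i+1) j)
    else
      1 + min (min (pvEd la lb i (j+1)) (pvEd la lb (i+1) j)) (pvEd la lb i j)

lemma pvEd_base_row (la lb : List Char) (x : Nat) : pvEd la lb x 0 = (x : Int) := by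
  cases x <;> simp [pvEd]

lemma pvEd_base_col (la lb : List Char) (y : Nat) : pvEd la lb 0 y = (y : Int) := by
  simp [pvEd]

-- canonical table of values
def pvTbl (n m : Nat) (f : Nat → Nat → Int) : List (List Int) :=
  (List.range (n+1)).map (fun x => (List.range (m+1)).map (fun y => f x y))

lemma set_map_range {α : Type} (N k : Nat) (f : Nat → α) (v : α) :
    ((List.range N).map f).set k v = (List.range N).map (fun x => if x = k then v else f x) := by
  apply List.ext_getElem; · simp
  intro i h1 h2
  simp only [List.getElem_set, List.getElem_map, List.getElem_range]
  simp at h1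
  by_cases hik : k = i <;> simp [hik]; omega

lemma pvTbl_congr (n m : Nat) (f g : Nat → Nat → Int)
    (h : ∀ x y, x ≤ n → y ≤ m → f x y = g x y) : pvTbl n m f = pvTbl n m g := by
  unfold pvTbl
  apply List.map_congr_left
  intro x hx
  simp at hx
  apply List.map_congr_left
  intro y hy
  simp at hy
  exact h x y (by omega) (by omega)

lemma pvGetCell_tbl (n m : Nat) (f : Nat → Nat → Int) (x y : Nat) (hx : x ≤ n) (hy : y ≤ m) :
    pvGetCell (pvTbl n m f) x y = f x y := by
  unfold pvGetCell pvTbl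
  rw [PySem.List.getD_map_range _ _ _ _ (by omega), PySem.List.getD_map_range _ _ _ _ (by omega)]

lemma pvSetCell_tbl (n m : Nat) (f : Nat → Nat → Int) (x y : Nat) (v : Int) (hx : x ≤ n) :
    pvSetCell (pvTbl n m f) x y v
      = pvTbl n m (fun x' y' => if x' = x ∧ y' = y then v else f x' y') := by
  unfold pvSetCell pvTbl
  rw [PySem.List.getD_map_range _ _ _ _ (by omega), set_map_range, set_map_range]
  apply List.map_congr_left
  intro x' hx'
  by_cases hxx : x' = x
  · simp only [hxx]
    apply List.map_congr_left
    intro y' hy'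
    by_cases hyy : y' = y <;> simp [hyy]
  · simp [hxx]

-- state after the two border-initialisation loops
def pvFInit (x y : Nat) : Int := if y = 0 then (x : Int) else if x = 0 then (y : Int) else 0

-- state after the first i' full DP rows (rows 1..i' filled)
def pvG (la lb : List Char) (i' : Nat) (x y : Nat) : Int :=
  if y = 0 ∨ x ≤ i' then pvEd la lb x y else 0

-- state inside row i'+1 after j' cells of that row
def pvF (la lb : List Char) (i' j' : Nat) (x y : Nat) : Int :=
  if y = 0 ∨ x ≤ i' ∨ (x = i' + 1 ∧ y ≤ j') then pvEd la lb x y else 0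

lemma init_rows_aux (n m : Nat) : ∀ (K : Nat),
    (List.range K).foldl (fun T i => pvSetCell T 0 i (i:Int)) (pvTbl n m (fun _ _ => 0))
    = pvTbl n m (fun x y => if x = 0 ∧ y < K then (y:Int) else 0) := by
  intro K
  induction K with
  | zero => simp
  | succ K ih =>
    rw [List.range_succ, List.foldl_append, ih]
    simp only [List.foldl_cons, List.foldl_nil]
    rw [pvSetCell_tbl _ _ _ _ _ _ (by omega)]
    apply pvTbl_congr
    intro x y hx hy
    split_ifs <;> omega

lemma init_cols_aux (n m : Nat) : ∀ (K : Nat), K ≤ n+1 →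
    (List.range K).foldl (fun T j => pvSetCell T j 0 (j:Int))
      (pvTbl n m (fun x y => if x = 0 ∧ y < m+1 then (y:Int) else 0))
    = pvTbl n m (fun x y => if y = 0 ∧ x < K then (x:Int) else if x = 0 ∧ y < m+1 then (y:Int) else 0) := by
  intro K
  induction K with
  | zero => intro _; simp
  | succ K ih =>
    intro hK
    rw [List.range_succ, List.foldl_append, ih (by omega)]
    simp only [List.foldl_cons, List.foldl_nil]
    rw [pvSetCell_tbl _ _ _ _ _ _ (by omega)]
    apply pvTbl_congr
    intro x y hx hy
    split_ifs <;> omega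

lemma init_all (n m : Nat) :
    (List.range (n+1)).foldl (fun T j => pvSetCell T j 0 (j:Int))
      ((List.range (m+1)).foldl (fun T i => pvSetCell T 0 i (i:Int)) (pvTbl n m (fun _ _ => 0)))
    = pvTbl n m pvFInit := by
  rw [init_rows_aux, init_cols_aux n m (n+1) (le_refl _)]
  apply pvTbl_congr
  intro x y hx hy
  unfold pvFInit
  split_ifs <;> omega

lemma pvF_read_up (la lb : List Char) (i' j' : Nat) :
    pvF la lb i' j' i' (j'+1) = pvEd la lb i' (j'+1) := by
  unfold pvF; rw [if_pos (by omega)]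

lemma pvF_read_left (la lb : List Char) (i' j' : Nat) :
    pvF la lb i' j' (i'+1) j' = pvEd la lb (i'+1) j' := by
  unfold pvF
  rcases Nat.eq_zero_or_pos j' with h | h
  · rw [if_pos (by omega)]
  · rw [if_pos (by omega)]

lemma pvF_read_diag (la lb : List Char) (i' j' : Nat) :
    pvF la lb i' j' i' j' = pvEd la lb i' j' := by
  unfold pvF; rw [if_pos (by omega)]

lemma rowStep_tbl (la lb : List Char) (i' j' : Nat) (hi : i' < la.length) (hj : j' < lb.length) :
    pvRowStep la lb i' (pvTbl la.length lb.length (pvF la lb i' j')) j'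
      = pvTbl la.length lb.length (pvF la lb i' (j'+1)) := by
  unfold pvRowStep
  simp only []
  simp only [Nat.add_sub_cancel]
  rw [pvGetCell_tbl _ _ _ _ _ (by omega) (by omega),
      pvGetCell_tbl _ _ _ _ _ (by omega) (by omega),
      pvGetCell_tbl _ _ _ _ _ (by omega) (by omega),
      pvF_read_up, pvF_read_left, pvF_read_diag]
  have hset : ∀ v : Int, v = pvEd la lb (i'+1) (j'+1) →
      pvSetCell (pvTbl la.length lb.length (pvF la lb i' j')) (i'+1) (j'+1) v
        = pvTbl la.length lb.length (pvF la lb i' (j'+1)) := by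
    intro v hv
    rw [pvSetCell_tbl _ _ _ _ _ _ (by omega)]
    apply pvTbl_congr
    intro x y hx hy
    by_cases hxy : x = i'+1 ∧ y = j'+1
    · obtain ⟨h1, h2⟩ := hxy; subst h1; subst h2
      rw [if_pos ⟨rfl, rfl⟩, hv]
      unfold pvF
      rw [if_pos (by omega)]
    · rw [if_neg hxy]
      unfold pvF
      split_ifs <;> first | rfl | omega
  by_cases heq : (la.getD i' ' ' == lb.getD j' ' ') = true
  · rw [if_pos heq]
    apply hset
    rw [pvEd]; rw [if_pos heq]
  · rw [if_neg heq]
    by_cases hva : pvVowel (la.getD i' ' ') = true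
    · rw [if_pos hva]
      by_cases hvb : pvVowel (lb.getD j' ' ') = true
      · rw [if_pos hvb]
        apply hset
        rw [pvEd]; rw [if_neg heq, if_neg (by rw [hva, hvb]; simp)]
      · have hvb' : pvVowel (lb.getD j' ' ') = false := by simpa using hvb
        rw [if_neg hvb]
        apply hset
        rw [pvEd]; rw [if_neg heq, if_pos (by rw [hva, hvb']; rfl)]
    · have hva' : pvVowel (la.getD i' ' ') = false := by simpa using hva
      rw [if_neg hva]
      apply hset
      rw [pvEd]; rw [if_neg heq, if_neg (by rw [hva']; simp)]

lemma row_fold (la lb : List Char) (i' : Nat) (hi : i' < la.length) :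
    ∀ (K : Nat), K ≤ lb.length →
    (List.range K).foldl (pvRowStep la lb i') (pvTbl la.length lb.length (pvF la lb i' 0))
      = pvTbl la.length lb.length (pvF la lb i' K) := by
  intro K
  induction K with
  | zero => intro _; simp
  | succ K ih =>
    intro hK
    rw [List.range_succ, List.foldl_append, ih (by omega)]
    simp only [List.foldl_cons, List.foldl_nil]
    exact rowStep_tbl la lb i' K hi (by omega)

lemma outerStep_tbl (la lb : List Char) (K : Nat) (hK : K < la.length) :
    pvOuterStep la lb (pvTbl la.length lb.length (pvG la lb K)) K
      = pvTbl la.length lb.length (pvG la lb (K+1)) := by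
  unfold pvOuterStep
  have h1 : pvTbl la.length lb.length (pvG la lb K) = pvTbl la.length lb.length (pvF la lb K 0) := by
    apply pvTbl_congr; intro x y hx hy; unfold pvG pvF; split_ifs <;> first | rfl | omega
  rw [h1, row_fold la lb K hK lb.length (le_refl _)]
  apply pvTbl_congr; intro x y hx hy; unfold pvG pvF; split_ifs <;> first | rfl | omega

lemma outer_fold (la lb : List Char) : ∀ (K : Nat), K ≤ la.length →
    (List.range K).foldl (pvOuterStep la lb) (pvTbl la.length lb.length (pvG la lb 0))
      = pvTbl la.length lb.length (pvG la lb K) := by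
  intro K
  induction K with
  | zero => intro _; simp
  | succ K ih =>
    intro hK
    rw [List.range_succ, List.foldl_append, ih (by omega)]
    simp only [List.foldl_cons, List.foldl_nil]
    exact outerStep_tbl la lb K (by omega)

lemma stringProblem_eq_pvEd (a b : String) :
    stringProblem a b = pvEd a.toList b.toList a.toList.length b.toList.length := by
  unfold stringProblem
  dsimp only
  have hT0 : ((List.range (a.toList.length+1)).map (fun _ => (List.range (b.toList.length+1)).map (fun _ => (0:Int))))
      = pvTbl a.toList.length b.toList.length (fun _ _ => 0) := rfl
  rw [hT0, init_all]
  have hG0 : pvTbl a.toList.length b.toList.length pvFInit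
      = pvTbl a.toList.length b.toList.length (pvG a.toList b.toList 0) := by
    apply pvTbl_congr; intro x y hx hy; unfold pvFInit pvG
    rcases Nat.eq_zero_or_pos y with h | h
    · subst h; rw [if_pos rfl, if_pos (by omega), pvEd_base_row]
    · rw [if_neg (by omega)]
      rcases Nat.eq_zero_or_pos x with h2 | h2
      · subst h2; rw [if_pos rfl, if_pos (by omega), pvEd_base_col]
      · rw [if_neg (by omega), if_neg (by omega)]
  rw [hG0, outer_fold a.toList b.toList a.toList.length (le_refl _),
     pvGetCell_tbl _ _ _ _ _ (le_refl _) (le_refl _)]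
  unfold pvG
  rw [if_pos (by omega)]

-- ===== B side: the memoized recursion computes pvEd and keeps the cache correct =====

-- every value stored in the cache is the true recurrence value at its key
def pvInv (la lb : List Char) (c : PySem.Dict (Nat × Nat) Int) : Prop :=
  ∀ (k : Nat × Nat) (v : Int), c.get? k = some v → v = pvEd la lb k.1 k.2

lemma pvInv_empty (la lb : List Char) : pvInv la lb PySem.Dict.empty := by
  intro k v h
  simp [PySem.Dict.get?_empty] at h

lemma pvInv_insert (la lb : List Char) (c : PySem.Dict (Nat × Nat) Int) (i j : Nat) (v : Int)
    (hc : pvInv la lb c) (hv : v = pvEd la lb i j) : pvInv la lb (c.insert (i, j) v) := by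
  intro k w h
  rw [PySem.Dict.get?_insert] at h
  split_ifs at h with hk
  · subst hk
    cases h
    exact hv
  · exact hc k w h

lemma pvEdMemo_correct (la lb : List Char) : ∀ (N i j : Nat) (c : PySem.Dict (Nat × Nat) Int),
    i + j ≤ N → pvInv la lb c →
    (pvEdMemo la lb i j c).1 = pvEd la lb i j ∧ pvInv la lb (pvEdMemo la lb i j c).2 := by
  intro N
  induction N with
  | zero =>
    intro i j c hN hc
    have hi : i = 0 := by omega
    have hj : j = 0 := by omega
    subst hi; subst hj
    rw [pvEdMemo]
    cases hget : c.get? (0, 0) with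
    | some v =>
      simp only
      exact ⟨hc (0,0) v hget, hc⟩
    | none =>
      simp only
      refine ⟨by simp [pvEd_base_col], ?_⟩
      exact pvInv_insert la lb c 0 0 _ hc (by simp [pvEd_base_col])
  | succ N ih =>
    intro i j c hN hc
    rw [pvEdMemo]
    cases hget : c.get? (i, j) with
    | some v =>
      simp only
      exact ⟨hc (i,j) v hget, hc⟩
    | none =>
      simp only
      by_cases hi : i = 0
      · subst hi
        simp only
        refine ⟨by simp [pvEd_base_col], ?_⟩
        exact pvInv_insert la lb c 0 j _ hc (by simp [pvEd_base_col])
      · rw [dif_neg hi]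
        by_cases hj : j = 0
        · subst hj
          simp only
          refine ⟨by simp [pvEd_base_row], ?_⟩
          exact pvInv_insert la lb c i 0 _ hc (by simp [pvEd_base_row])
        · rw [dif_neg hj]
          obtain ⟨i', rfl⟩ : ∃ i', i = i' + 1 := ⟨i - 1, by omega⟩
          obtain ⟨j', rfl⟩ : ∃ j', j = j' + 1 := ⟨j - 1, by omega⟩
          simp only [Nat.add_sub_cancel]
          by_cases heq : (la.getD i' ' ' == lb.getD j' ' ') = true
          · rw [if_pos heq]
            obtain ⟨h1, h2⟩ := ih i' j' c (by omega) hc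
            refine ⟨?_, pvInv_insert la lb _ _ _ _ h2 ?_⟩ <;>
              rw [h1, pvEd, if_pos heq]
          · rw [if_neg heq]
            by_cases hv2 : (pvVowelB (la.getD i' ' ') && !pvVowelB (lb.getD j' ' ')) = true
            · rw [if_pos hv2]
              obtain ⟨h1, hc1⟩ := ih i' (j'+1) c (by omega) hc
              obtain ⟨h2, hc2⟩ := ih (i'+1) j' _ (by omega) hc1
              have hval : (1 : Int) + min (pvEdMemo la lb i' (j'+1) c).1
                  (pvEdMemo la lb (i'+1) j' (pvEdMemo la lb i' (j'+1) c).2).1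
                  = pvEd la lb (i'+1) (j'+1) := by
                rw [h1, h2, pvEd, if_neg heq, if_pos (show (pvVowel (la.getD i' ' ') && !pvVowel (lb.getD j' ' ')) = true from hv2)]
              exact ⟨hval, pvInv_insert la lb _ _ _ _ hc2 hval.symm.symm⟩
            · rw [if_neg hv2]
              obtain ⟨h1, hc1⟩ := ih i' (j'+1) c (by omega) hc
              obtain ⟨h2, hc2⟩ := ih (i'+1) j' _ (by omega) hc1
              obtain ⟨h3, hc3⟩ := ih i' j' _ (by omega) hc2
              have hval : (1 : Int) + min (min (pvEdMemo la lb i' (j'+1) c).1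
                    (pvEdMemo la lb (i'+1) j' (pvEdMemo la lb i' (j'+1) c).2).1)
                    (pvEdMemo la lb i' j' (pvEdMemo la lb (i'+1) j' (pvEdMemo la lb i' (j'+1) c).2).2).1
                  = pvEd la lb (i'+1) (j'+1) := by
                rw [h1, h2, h3, pvEd, if_neg heq, if_neg (show ¬(pvVowel (la.getD i' ' ') && !pvVowel (lb.getD j' ' ')) = true from hv2)]
              exact ⟨hval, pvInv_insert la lb _ _ _ _ hc3 hval.symm.symm⟩

lemma stringProblem_alt_eq_pvEd (a b : String) :
    stringProblem_alt a b = pvEd a.toList b.toList a.toList.length b.toList.length := by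
  unfold stringProblem_alt
  exact (pvEdMemo_correct a.toList b.toList (a.toList.length + b.toList.length)
    a.toList.length b.toList.length PySem.Dict.empty (le_refl _) (pvInv_empty _ _)).1

-- ===== VERDICT (by name: the statement is the Claim_ definition above) =====
theorem stringProblem_spec : Claim_equal_stringProblem := by
  intro a b _
  unfold Spec_stringProblem
  rw [stringProblem_eq_pvEd, stringProblem_alt_eq_pvEd]
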